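-- pv_equiv track=rewrite | github.com/iojini/nexus | integrations/crowdstrike.py | generate_falcon_query
-- ===== SOURCE A (Python) =====
-- from typing import List, Dict
--
-- def generate_falcon_query(iocs: List[Dict]) -> str:
--     """
--     Generate Falcon Query Language (FQL) for hunting
--
--     Returns FQL that can be used in Falcon UI or API
--     """
--     ips = [ioc["value"] for ioc in iocs if ioc.get("type") == "ipv4"]
--     domains = [ioc["value"] for ioc in iocs if ioc.get("type") == "domain"]
--     hashes = [ioc["value"] for ioc in iocs if ioc.get("type") in ["md5", "sha256"]]
--
--     queries = []
--
--     if ips: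
--         ip_list = ",".join(f"'{ip}'" for ip in ips[:50])
--         queries.append(f"RemoteAddressIP4:[{ip_list}]")
--
--     if domains:
--         domain_list = ",".join(f"'{d}'" for d in domains[:50])
--         queries.append(f"DomainName:[{domain_list}]")
--
--     if hashes:
--         hash_list = ",".join(f"'{h}'" for h in hashes[:50])
--         queries.append(f"SHA256HashData:[{hash_list}] OR MD5HashData:[{hash_list}]")
--
--     return " OR ".join(queries) if queries else "// No IOCs for query"
-- ===== SOURCE B (Python) =====
-- from typing import List, Dict
--
-- def generate_falcon_query(iocs: List[Dict]) -> str: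
--     """Stream matching IOCs straight into capped, pre-joined string buffers per
--     category (table-driven dispatch; no intermediate value lists, no slicing,
--     no per-category join at the end)."""
--     _CAT = {"ipv4": 0, "domain": 1, "md5": 2, "sha256": 2}
--     buf = ["", "", ""]
--     cnt = [0, 0, 0]
--     for ioc in iocs:
--         i = _CAT.get(ioc.get("type"))
--         if i is None:
--             continue
--         if cnt[i] < 50:
--             if cnt[i]:
--                 buf[i] += ","
--             buf[i] += f"'{ioc['value']}'"
--         cnt[i] += 1
--     parts = []
--     if cnt[0]:
--         parts.append(f"RemoteAddressIP4:[{buf[0]}]")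
--     if cnt[1]:
--         parts.append(f"DomainName:[{buf[1]}]")
--     if cnt[2]:
--         parts.append(f"SHA256HashData:[{buf[2]}] OR MD5HashData:[{buf[2]}]")
--     return " OR ".join(parts) if parts else "// No IOCs for query"
-- ===== Notes on version B (the rewrite author's own statement) =====
-- stated objective: alternative
-- what changed: A extracts three value lists by filtering comprehensions and then slices, quotes and joins each; B keeps no value lists at all: a type->category lookup table dispatches each IOC in one stream, writing the quoted value straight into a capped, pre-joined string buffer with a per-category counter, and the clauses are read off the buffers.
import Mathlib
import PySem

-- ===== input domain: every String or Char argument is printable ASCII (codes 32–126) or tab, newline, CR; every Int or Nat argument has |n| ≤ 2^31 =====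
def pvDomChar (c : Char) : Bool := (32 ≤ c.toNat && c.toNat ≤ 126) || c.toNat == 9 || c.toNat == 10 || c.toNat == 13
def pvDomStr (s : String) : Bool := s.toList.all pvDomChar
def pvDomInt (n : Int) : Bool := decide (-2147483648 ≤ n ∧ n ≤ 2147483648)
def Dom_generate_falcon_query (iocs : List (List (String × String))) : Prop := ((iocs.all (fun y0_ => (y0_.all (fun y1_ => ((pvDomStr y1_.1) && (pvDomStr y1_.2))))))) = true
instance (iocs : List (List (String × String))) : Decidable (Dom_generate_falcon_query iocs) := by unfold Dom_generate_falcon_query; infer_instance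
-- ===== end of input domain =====

-- B replaces A's three filtering comprehensions + slice + join pipeline by a table-driven stream that writes each matching IOC straight into a capped, pre-joined string buffer with a counter per category (alternative decomposition, same cost class).


-- shared primitive accessor: ioc.get(k) on the association-list encoding of a Python dict
def pvGet? (d : List (String × String)) (k : String) : Option String :=
  PySem.Dict.get? (PySem.Dict.mk d) k

-- ioc["value"]: Pre_ guarantees the key is present wherever it is demanded, so getD "" is exact there
def pvVal (d : List (String × String)) : String := (pvGet? d "value").getD ""

-- ===== PORT A =====
def generate_falcon_query (iocs : List (List (String × String))) : String :=
  let ips := (iocs.filter (fun d => pvGet? d "type" == some "ipv4")).map pvVal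
  let domains := (iocs.filter (fun d => pvGet? d "type" == some "domain")).map pvVal
  let hashes := (iocs.filter (fun d => pvGet? d "type" == some "md5" || pvGet? d "type" == some "sha256")).map pvVal
  let queries : List String := []
  let queries := if ips.isEmpty then queries else
    queries ++ ["RemoteAddressIP4:[" ++ PySem.Str.join "," ((PySem.List.slice ips none (some 50)).map (fun ip => "'" ++ ip ++ "'")) ++ "]"]
  let queries := if domains.isEmpty then queries else
    queries ++ ["DomainName:[" ++ PySem.Str.join "," ((PySem.List.slice domains none (some 50)).map (fun d => "'" ++ d ++ "'")) ++ "]"]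
  let queries := if hashes.isEmpty then queries else
    let hash_list := PySem.Str.join "," ((PySem.List.slice hashes none (some 50)).map (fun h => "'" ++ h ++ "'"))
    queries ++ ["SHA256HashData:[" ++ hash_list ++ "] OR MD5HashData:[" ++ hash_list ++ "]"]
  if queries.isEmpty then "// No IOCs for query" else PySem.Str.join " OR " queries

-- ===== PORT B =====
-- _CAT.get(ioc.get("type")): dict lookup (missing key / None key → none)
def pvCat (t : Option String) : Option Int :=
  match t with
  | none => none
  | some s => PySem.Dict.get? (PySem.Dict.mk [("ipv4", (0 : Int)), ("domain", 1), ("md5", 2), ("sha256", 2)]) s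

-- one iteration of Source B's loop over the state (buf, cnt); buf[i] += … transcribed per index
def pvStepB (st : (String × String × String) × (Int × Int × Int)) (d : List (String × String)) :
    (String × String × String) × (Int × Int × Int) :=
  match pvCat (pvGet? d "type") with
  | none => st
  | some i =>
    if i = 0 then
      ((if st.2.1 < 50 then st.1.1 ++ (if st.2.1 ≠ 0 then "," else "") ++ ("'" ++ pvVal d ++ "'") else st.1.1,
        st.1.2.1, st.1.2.2),
       (st.2.1 + 1, st.2.2.1, st.2.2.2))
    else if i = 1 then
      ((st.1.1,
        (if st.2.2.1 < 50 then st.1.2.1 ++ (if st.2.2.1 ≠ 0 then "," else "") ++ ("'" ++ pvVal d ++ "'") else st.1.2.1),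
        st.1.2.2),
       (st.2.1, st.2.2.1 + 1, st.2.2.2))
    else
      ((st.1.1, st.1.2.1,
        (if st.2.2.2 < 50 then st.1.2.2 ++ (if st.2.2.2 ≠ 0 then "," else "") ++ ("'" ++ pvVal d ++ "'") else st.1.2.2)),
       (st.2.1, st.2.2.1, st.2.2.2 + 1))

def generate_falcon_query_alt (iocs : List (List (String × String))) : String :=
  let st := iocs.foldl pvStepB (("", "", ""), (0, 0, 0))
  let parts : List String :=
    (if st.2.1 ≠ 0 then ["RemoteAddressIP4:[" ++ st.1.1 ++ "]"] else []) ++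
    (if st.2.2.1 ≠ 0 then ["DomainName:[" ++ st.1.2.1 ++ "]"] else []) ++
    (if st.2.2.2 ≠ 0 then ["SHA256HashData:[" ++ st.1.2.2 ++ "] OR MD5HashData:[" ++ st.1.2.2 ++ "]"] else [])
  if parts.isEmpty then "// No IOCs for query" else PySem.Str.join " OR " parts

-- ===== PRECONDITION & SPEC =====
-- Pre_ excludes exactly the inputs where Python's A raises KeyError: an ioc whose "type" is one
-- of the hunted categories but which has no "value" key.
def Pre_generate_falcon_query (iocs : List (List (String × String))) : Prop :=
  ∀ d ∈ iocs,
    (pvGet? d "type" = some "ipv4" ∨ pvGet? d "type" = some "domain" ∨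
     pvGet? d "type" = some "md5" ∨ pvGet? d "type" = some "sha256") →
    (pvGet? d "value").isSome = true
instance (iocs : List (List (String × String))) : Decidable (Pre_generate_falcon_query iocs) := by
  unfold Pre_generate_falcon_query; infer_instance

def pvWitness_generate_falcon_query : (List (List (String × String))) :=
  [[("type", "ipv4"), ("value", "1.2.3.4")], [("note", "x")]]

def Spec_generate_falcon_query (iocs : List (List (String × String))) (out : String) : Prop := out = generate_falcon_query_alt iocs
instance (iocs : List (List (String × String))) (out : String) : Decidable (Spec_generate_falcon_query iocs out) := by unfold Spec_generate_falcon_query; infer_instance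

-- ===== CLAIM (what is proved, stated in full; the proofs are below) =====
def Claim_equal_generate_falcon_query : Prop := ∀ (iocs : List (List (String × String))), Dom_generate_falcon_query iocs → Pre_generate_falcon_query iocs → Spec_generate_falcon_query iocs (generate_falcon_query iocs)

-- ===== LEMMAS AND PROOFS =====

-- A's per-category clause body: join of the quoted first-50 values
def pvJ (xs : List String) : String :=
  PySem.Str.join "," ((xs.take 50).map (fun v => "'" ++ v ++ "'"))

-- join over a snoc (char level)
lemma cj_snoc (sep : List Char) (L : List (List Char)) (c : List Char) :
    PySem.Chars.join sep (L ++ [c]) =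
      PySem.Chars.join sep L ++ (if L.isEmpty then [] else sep) ++ c := by
  induction L with
  | nil => simp [PySem.Chars.join_nil, PySem.Chars.join_singleton]
  | cons a L ih =>
    cases L with
    | nil => simp [PySem.Chars.join_singleton, PySem.Chars.join_cons_cons]
    | cons b L' =>
      have hsh : (a :: b :: L') ++ [c] = a :: (b :: (L' ++ [c])) := by simp
      rw [hsh, PySem.Chars.join_cons_cons, ← List.cons_append, ih]
      simp [PySem.Chars.join_cons_cons, List.append_assoc]

-- B's buffer update is exactly pvJ of the snoc'd value list
lemma bucket_step (xs : List String) (v : String) :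
    (if xs.length < 50 then (pvJ xs ++ if xs = [] then "" else ",") ++ ("'" ++ v ++ "'")
      else pvJ xs) = pvJ (xs ++ [v]) := by
  by_cases h : xs.length < 50
  · rw [if_pos h]
    have htake : (xs ++ [v]).take 50 = xs ++ [v] :=
      List.take_of_length_le (by simp; omega)
    have hxs : xs.take 50 = xs := List.take_of_length_le (by omega)
    apply String.toList_inj.mp
    by_cases h0 : xs = []
    · subst h0
      simp [pvJ, PySem.Str.toList_join, String.toList_append,
        PySem.Chars.join_nil, PySem.Chars.join_singleton]
    · rw [if_neg h0]
      simp only [pvJ, htake, hxs, List.map_append, List.map_cons, List.map_nil,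
        PySem.Str.toList_join, String.toList_append, List.map_map]
      rw [cj_snoc]
      simp [h0, List.append_assoc]
  · rw [if_neg h]
    have : (xs ++ [v]).take 50 = xs.take 50 := by
      rw [List.take_append_of_le_length (by omega)]
    simp [pvJ, this]

-- the three category value lists A extracts
def pvI (l : List (List (String × String))) : List String :=
  (l.filter (fun d => pvGet? d "type" == some "ipv4")).map pvVal
def pvD (l : List (List (String × String))) : List String :=
  (l.filter (fun d => pvGet? d "type" == some "domain")).map pvVal
def pvH (l : List (List (String × String))) : List String :=
  (l.filter (fun d => pvGet? d "type" == some "md5" || pvGet? d "type" == some "sha256")).map pvVal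

lemma pvCat_eq (t : Option String) :
    pvCat t = if t = some "ipv4" then some 0
      else if t = some "domain" then some 1
      else if (t = some "md5" ∨ t = some "sha256") then some 2 else none := by
  cases t with
  | none => simp [pvCat]
  | some s =>
    have hnil : (PySem.Dict.mk ([] : List (String × Int))).get? s = none :=
      (PySem.Dict.get?_eq_none_iff_contains _ s).mpr rfl
    simp only [pvCat, PySem.Dict.get?_mk_cons, hnil, beq_iff_eq, Option.some.injEq]
    split_ifs <;> first | rfl | (exfalso; simp_all) | tauto

-- invariant: B's fold over the streamed state = pvJ / length of A's bucket lists
lemma foldB (l : List (List (String × String))) (as bs cs : List String) :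
    l.foldl pvStepB ((pvJ as, pvJ bs, pvJ cs),
        ((as.length : Int), (bs.length : Int), (cs.length : Int))) =
      ((pvJ (as ++ pvI l), pvJ (bs ++ pvD l), pvJ (cs ++ pvH l)),
       (((as ++ pvI l).length : Int), ((bs ++ pvD l).length : Int), ((cs ++ pvH l).length : Int))) := by
  induction l generalizing as bs cs with
  | nil => simp [pvI, pvD, pvH]
  | cons d l ih =>
    rw [List.foldl_cons]
    by_cases h1 : pvGet? d "type" = some "ipv4"
    · have hstep : pvStepB ((pvJ as, pvJ bs, pvJ cs),
          ((as.length : Int), (bs.length : Int), (cs.length : Int))) d =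
          ((pvJ (as ++ [pvVal d]), pvJ bs, pvJ cs),
           (((as ++ [pvVal d]).length : Int), (bs.length : Int), (cs.length : Int))) := by
        simp [pvStepB, pvCat_eq, h1, bucket_step]
      rw [hstep, ih]
      simp [pvI, pvD, pvH, h1, List.append_assoc]
    · by_cases h2 : pvGet? d "type" = some "domain"
      · have hstep : pvStepB ((pvJ as, pvJ bs, pvJ cs),
            ((as.length : Int), (bs.length : Int), (cs.length : Int))) d =
            ((pvJ as, pvJ (bs ++ [pvVal d]), pvJ cs),
             ((as.length : Int), ((bs ++ [pvVal d]).length : Int), (cs.length : Int))) := by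
          simp [pvStepB, pvCat_eq, h2, bucket_step]
        rw [hstep, ih]
        simp [pvI, pvD, pvH, h2, List.append_assoc]
      · by_cases h3 : pvGet? d "type" = some "md5" ∨ pvGet? d "type" = some "sha256"
        · have hstep : pvStepB ((pvJ as, pvJ bs, pvJ cs),
              ((as.length : Int), (bs.length : Int), (cs.length : Int))) d =
              ((pvJ as, pvJ bs, pvJ (cs ++ [pvVal d])),
               ((as.length : Int), (bs.length : Int), ((cs ++ [pvVal d]).length : Int))) := by
            rcases h3 with h3 | h3 <;>
              simp [pvStepB, pvCat_eq, h3, bucket_step]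
          rw [hstep, ih]
          rcases h3 with h3 | h3 <;>
            simp [pvI, pvD, pvH, h3, List.append_assoc]
        · have hstep : pvStepB ((pvJ as, pvJ bs, pvJ cs),
              ((as.length : Int), (bs.length : Int), (cs.length : Int))) d =
              ((pvJ as, pvJ bs, pvJ cs),
               ((as.length : Int), (bs.length : Int), (cs.length : Int))) := by
            simp [pvStepB, pvCat_eq, h1, h2, h3]
          push Not at h3
          rw [hstep, ih]
          simp [pvI, pvD, pvH, h1, h2, h3.1, h3.2]

-- A's slice-to-50 clause body is pvJ
lemma slice_eq_pvJ (xs : List String) :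
    PySem.Str.join "," ((PySem.List.slice xs none (some 50)).map (fun v => "'" ++ v ++ "'")) = pvJ xs := by
  rw [PySem.List.slice_to xs (by norm_num), show ((50 : Int)).toNat = 50 from rfl]
  simp [pvJ, List.map_take]

-- A's sequential query assembly = B's concatenated parts assembly, for the same three lists
lemma assemble (xs ys zs : List String) :
    (let q1 := if xs.isEmpty then ([] : List String) else
      [] ++ ["RemoteAddressIP4:[" ++ pvJ xs ++ "]"]
     let q2 := if ys.isEmpty then q1 else q1 ++ ["DomainName:[" ++ pvJ ys ++ "]"]
     let q3 := if zs.isEmpty then q2 else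
      q2 ++ ["SHA256HashData:[" ++ pvJ zs ++ "] OR MD5HashData:[" ++ pvJ zs ++ "]"]
     if q3.isEmpty then "// No IOCs for query" else PySem.Str.join " OR " q3) =
    (let parts : List String :=
      (if ((xs.length : Int)) ≠ 0 then ["RemoteAddressIP4:[" ++ pvJ xs ++ "]"] else []) ++
      (if ((ys.length : Int)) ≠ 0 then ["DomainName:[" ++ pvJ ys ++ "]"] else []) ++
      (if ((zs.length : Int)) ≠ 0 then
        ["SHA256HashData:[" ++ pvJ zs ++ "] OR MD5HashData:[" ++ pvJ zs ++ "]"] else [])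
     if parts.isEmpty then "// No IOCs for query" else PySem.Str.join " OR " parts) := by
  by_cases hx : xs = [] <;> by_cases hy : ys = [] <;> by_cases hz : zs = [] <;>
    simp [hx, hy, hz, List.isEmpty_iff, List.length_eq_zero_iff]

-- ===== VERDICT (by name: the statement is the Claim_ definition above) =====
theorem generate_falcon_query_spec : Claim_equal_generate_falcon_query := by
  intro iocs _ _
  unfold Spec_generate_falcon_query generate_falcon_query generate_falcon_query_alt
  have h0 : ((("" : String), ("" : String), ("" : String)),
        ((0 : Int), (0 : Int), (0 : Int))) =
      ((pvJ [], pvJ [], pvJ []),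
       ((List.length ([] : List String) : Int), (List.length ([] : List String) : Int),
        (List.length ([] : List String) : Int))) := by
    simp [pvJ, PySem.Str.join, PySem.Chars.join, List.intercalate]
  rw [h0, foldB iocs [] [] []]
  simp only [List.nil_append, slice_eq_pvJ]
  exact assemble (pvI iocs) (pvD iocs) (pvH iocs)
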